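-- pv_equiv track=rewrite | github.com/Haoedon/----3 | test_gost_transform.py | t_transform
-- ===== SOURCE A (Python) =====
-- SBOX = [
--     [14, 4, 13, 1, 2, 15, 11, 8, 3, 10, 6, 12, 5, 9, 0, 7],
--     [0, 15, 7, 4, 14, 2, 13, 1, 10, 6, 12, 11, 9, 5, 3, 8],
--     [4, 1, 14, 8, 13, 6, 2, 11, 15, 12, 9, 7, 3, 10, 0, 5],
--     [15, 12, 8, 2, 4, 9, 1, 7, 5, 11, 3, 14, 10, 0, 6, 13],
--     [15, 1, 8, 14, 6, 11, 3, 4, 9, 7, 2, 13, 12, 0, 5, 10],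
--     [3, 13, 4, 7, 15, 2, 8, 14, 12, 0, 1, 10, 6, 9, 11, 5],
--     [0, 14, 7, 11, 10, 4, 13, 1, 5, 8, 12, 6, 15, 3, 12, 2],
--     [13, 8, 15, 1, 2, 5, 4, 14, 7, 0, 10, 12, 6, 9, 3, 11],
-- ]
--
-- def apply_sbox(nibble, sbox_num):
--     """Применение S-блока к полубайту"""
--     sbox_idx = sbox_num % len(SBOX)
--     return SBOX[sbox_idx][nibble & 0x0F]
--
-- def t_transform(value):
--     """t-преобразование для 32-битного значения"""
--     result = 0
--
--     # Обрабатываем 4 байта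
--     for byte_idx in range(4):
--         # Извлекаем байт
--         byte_val = (value >> (byte_idx * 8)) & 0xFF
--
--         # Разбиваем на полубайты
--         low_nibble = byte_val & 0x0F
--         high_nibble = (byte_val >> 4) & 0x0F
--
--         # Применяем S-блоки
--         sbox_num_low = (byte_idx * 2) % 8
--         sbox_num_high = (byte_idx * 2 + 1) % 8
--
--         transformed_low = apply_sbox(low_nibble, sbox_num_low)
--         transformed_high = apply_sbox(high_nibble, sbox_num_high)
--
--         # Собираем байт
--         transformed_byte = (transformed_high << 4) | transformed_low
--
--         # Добавляем в результат
--         result |= transformed_byte << (byte_idx * 8)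
--
--     return result
-- ===== SOURCE B (Python) =====
-- SBOX = [
--     [14, 4, 13, 1, 2, 15, 11, 8, 3, 10, 6, 12, 5, 9, 0, 7],
--     [0, 15, 7, 4, 14, 2, 13, 1, 10, 6, 12, 11, 9, 5, 3, 8],
--     [4, 1, 14, 8, 13, 6, 2, 11, 15, 12, 9, 7, 3, 10, 0, 5],
--     [15, 12, 8, 2, 4, 9, 1, 7, 5, 11, 3, 14, 10, 0, 6, 13],
--     [15, 1, 8, 14, 6, 11, 3, 4, 9, 7, 2, 13, 12, 0, 5, 10],
--     [3, 13, 4, 7, 15, 2, 8, 14, 12, 0, 1, 10, 6, 9, 11, 5],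
--     [0, 14, 7, 11, 10, 4, 13, 1, 5, 8, 12, 6, 15, 3, 12, 2],
--     [13, 8, 15, 1, 2, 5, 4, 14, 7, 0, 10, 12, 6, 9, 3, 11],
-- ]
--
-- # One precomputed 256-entry byte-substitution table per byte position, built once:
-- # table i sends a whole byte b to SBOX[2*i+1][b >> 4] << 4 | SBOX[2*i][b & 0x0F],
-- # so the transform itself needs no nibble splitting at all.
-- BYTE_TABLES = [
--     [(SBOX[2 * i + 1][b >> 4] << 4) | SBOX[2 * i][b & 0x0F] for b in range(256)]
--     for i in range(4)
-- ]
--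
--
-- def t_transform(value):
--     """t-transform via 4 whole-byte table lookups, accumulated Horner-style from the top byte."""
--     result = 0
--     for i in (3, 2, 1, 0):
--         result = (result << 8) | BYTE_TABLES[i][(value >> (8 * i)) & 0xFF]
--     return result
-- ===== Notes on version B (the rewrite author's own statement) =====
-- stated objective: alternative
-- what changed: A splits each byte into nibbles and runs 8 S-box lookups per call; B precomputes four 256-entry whole-byte substitution tables once at module load, so the transform itself is 4 table lookups accumulated Horner-style from the most significant byte down.
import Mathlib
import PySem

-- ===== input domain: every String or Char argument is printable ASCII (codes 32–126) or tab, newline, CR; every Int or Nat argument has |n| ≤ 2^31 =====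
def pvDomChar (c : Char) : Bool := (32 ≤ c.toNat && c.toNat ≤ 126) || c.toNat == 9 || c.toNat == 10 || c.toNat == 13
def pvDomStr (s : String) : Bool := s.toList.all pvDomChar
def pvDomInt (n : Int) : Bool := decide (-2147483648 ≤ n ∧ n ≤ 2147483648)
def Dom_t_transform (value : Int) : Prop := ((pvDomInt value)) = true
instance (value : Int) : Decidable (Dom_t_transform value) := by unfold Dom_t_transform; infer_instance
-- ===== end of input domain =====

-- B precomputes four 256-entry whole-byte substitution tables once and does the transform
-- with 4 table lookups folded Horner-style from the top byte: objective 'alternative'.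

-- ===== PORT A =====
-- the module-level SBOX constant (shared by both Pythons)
def pvSBOX : List (List Int) := [
  [14, 4, 13, 1, 2, 15, 11, 8, 3, 10, 6, 12, 5, 9, 0, 7],
  [0, 15, 7, 4, 14, 2, 13, 1, 10, 6, 12, 11, 9, 5, 3, 8],
  [4, 1, 14, 8, 13, 6, 2, 11, 15, 12, 9, 7, 3, 10, 0, 5],
  [15, 12, 8, 2, 4, 9, 1, 7, 5, 11, 3, 14, 10, 0, 6, 13],
  [15, 1, 8, 14, 6, 11, 3, 4, 9, 7, 2, 13, 12, 0, 5, 10],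
  [3, 13, 4, 7, 15, 2, 8, 14, 12, 0, 1, 10, 6, 9, 11, 5],
  [0, 14, 7, 11, 10, 4, 13, 1, 5, 8, 12, 6, 15, 3, 12, 2],
  [13, 8, 15, 1, 2, 5, 4, 14, 7, 0, 10, 12, 6, 9, 3, 11]]

-- SBOX[sbox_idx][nibble & 0x0F]; both indices are always in range (sbox_idx = sbox_num % 8,
-- 0 ≤ nibble & 15 < 16 = row length), so Python never raises here and the IndexError option
-- is discharged with getD.
def apply_sbox (nibble : Int) (sbox_num : Int) : Int :=
  let sbox_idx := PySem.Int.mod sbox_num 8   -- len(SBOX) = 8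
  ((PySem.List.pyGet? ((PySem.List.pyGet? pvSBOX sbox_idx).getD [])
      (PySem.Int.band nibble 15))).getD 0

-- the shift amounts byte_idx * 8 are 0,8,16,24 ≥ 0, so .toNat is exact
def t_transform (value : Int) : Int :=
  (PySem.List.pyRange 0 4 1).foldl (fun result byte_idx =>
    let byte_val := PySem.Int.band (value >>> (byte_idx * 8).toNat) 255
    let low_nibble := PySem.Int.band byte_val 15
    let high_nibble := PySem.Int.band (byte_val >>> (4 : Nat)) 15
    let sbox_num_low := PySem.Int.mod (byte_idx * 2) 8
    let sbox_num_high := PySem.Int.mod (byte_idx * 2 + 1) 8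
    let transformed_low := apply_sbox low_nibble sbox_num_low
    let transformed_high := apply_sbox high_nibble sbox_num_high
    let transformed_byte := PySem.Int.bor (transformed_high <<< (4 : Nat)) transformed_low
    PySem.Int.bor result (transformed_byte <<< (byte_idx * 8).toNat)) 0

-- ===== PORT B =====
-- BYTE_TABLES: one 256-entry table per byte position, table i sends byte b to
-- SBOX[2*i+1][b >> 4] << 4 | SBOX[2*i][b & 0x0F]; indices 2*i, 2*i+1 < 8 and
-- b >> 4, b & 15 < 16 are always in range, so getD is exact.
def pvByteTables : List (List Int) :=
  (List.range 4).map (fun i => (List.range 256).map (fun b =>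
    PySem.Int.bor (((pvSBOX.getD (2 * i + 1) []).getD (b >>> 4) 0) <<< (4 : Nat))
      ((pvSBOX.getD (2 * i) []).getD (b &&& 15) 0)))

-- for i in (3, 2, 1, 0): result = (result << 8) | BYTE_TABLES[i][(value >> (8*i)) & 0xFF];
-- the byte index (… & 255) is in [0, 256) so .toNat and getD are exact
def t_transform_alt (value : Int) : Int :=
  [3, 2, 1, 0].foldl (fun result i =>
    PySem.Int.bor (result <<< (8 : Nat))
      ((pvByteTables.getD i []).getD (PySem.Int.band (value >>> (8 * i)) 255).toNat 0)) 0

-- ===== PRECONDITION & SPEC =====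
def Spec_t_transform (value : Int) (out : Int) : Prop := out = t_transform_alt value
instance (value : Int) (out : Int) : Decidable (Spec_t_transform value out) := by unfold Spec_t_transform; infer_instance

-- ===== CLAIM (what is proved, stated in full; the proofs are below) =====
def Claim_equal_t_transform : Prop := ∀ (value : Int), Dom_t_transform value → Spec_t_transform value (t_transform value)

-- ===== LEMMAS AND PROOFS =====

theorem band15 (x : Int) : PySem.Int.band x 15 = x % 16 := by
  unfold PySem.Int.band
  by_cases hx : 0 ≤ x
  · simp only [hx, if_true, show (0:Int) ≤ 15 by norm_num, show Int.toNat 15 = 15 from rfl]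
    have h := Nat.and_two_pow_sub_one_eq_mod x.toNat 4
    simp only [show (2:Nat)^4 = 16 from rfl] at h
    rw [h]; omega
  · simp only [hx, if_false, show (0:Int) ≤ 15 by norm_num, if_true, show Int.toNat 15 = 15 from rfl]
    have h := Nat.and_two_pow_sub_one_eq_mod (-x-1).toNat 4
    simp only [show (2:Nat)^4 = 16 from rfl] at h
    rw [Nat.and_comm, h]; omega

theorem band255 (x : Int) : PySem.Int.band x 255 = x % 256 := by
  unfold PySem.Int.band
  by_cases hx : 0 ≤ x
  · simp only [hx, if_true, show (0:Int) ≤ 255 by norm_num, show Int.toNat 255 = 255 from rfl]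
    have h := Nat.and_two_pow_sub_one_eq_mod x.toNat 8
    simp only [show (2:Nat)^8 = 256 from rfl] at h
    rw [h]; omega
  · simp only [hx, if_false, show (0:Int) ≤ 255 by norm_num, if_true, show Int.toNat 255 = 255 from rfl]
    have h := Nat.and_two_pow_sub_one_eq_mod (-x-1).toNat 8
    simp only [show (2:Nat)^8 = 256 from rfl] at h
    rw [Nat.and_comm, h]; omega

theorem natOrAdd (k : Nat) : ∀ (m r : Nat), r < 2^k → m * 2^k ||| r = m * 2^k + r := by
  induction k with
  | zero =>
    intro m r h
    have hr : r = 0 := by omega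
    subst hr; simp
  | succ k ih =>
    intro m r h
    have hb : r = Nat.bit (decide (r % 2 = 1)) (r / 2) := by
      rcases Nat.mod_two_eq_zero_or_one r with h2 | h2 <;> simp [Nat.bit, h2] <;> omega
    have hm : m * 2 ^ (k+1) = Nat.bit false (m * 2 ^ k) := by
      simp [Nat.bit]; ring
    rw [hm, hb, Nat.lor_bit, ih m (r/2) (by omega)]
    rcases Nat.mod_two_eq_zero_or_one r with h2 | h2 <;> simp [Nat.bit, h2] <;> omega

theorem intOrAdd (c : Int) (k : Nat) (hc : c = 2^k) (a b : Int) (ha : 0 ≤ a) (hb : 0 ≤ b)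
    (hbk : b < c) : PySem.Int.bor (a * c) b = a * c + b := by
  subst hc
  obtain ⟨m, rfl⟩ := Int.eq_ofNat_of_zero_le ha
  obtain ⟨r, rfl⟩ := Int.eq_ofNat_of_zero_le hb
  have hr : r < 2^k := by exact_mod_cast hbk
  have hm : (m : Int) * 2^k = ((m * 2^k : Nat) : Int) := by push_cast; ring
  rw [hm, PySem.Int.bor_of_nonneg (by positivity) (by positivity)]
  simp only [Int.toNat_natCast, natOrAdd k m r hr]
  push_cast; ring

-- bor with the scaled summand on the right, as in A's accumulation
theorem intOrAdd' (c : Int) (k : Nat) (hc : c = 2^k) (a b : Int) (ha : 0 ≤ a) (hak : a < c)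
    (hb : 0 ≤ b) : PySem.Int.bor a (b * c) = b * c + a := by
  rw [PySem.Int.bor_comm]; exact intOrAdd c k hc b a hb ha hak

theorem rowBound (row : List Int) (hrow : row ∈ pvSBOX) (j : Nat) :
    0 ≤ row.getD j 0 ∧ row.getD j 0 < 16 := by
  have hall : ∀ x ∈ pvSBOX, ∀ y ∈ x, 0 ≤ y ∧ y < 16 := by decide
  rcases Nat.lt_or_ge j row.length with hj | hj
  · rw [List.getD_eq_getElem row 0 hj]
    exact hall row hrow _ (List.getElem_mem hj)
  · rw [List.getD_eq_default row 0 hj]; norm_num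

theorem getD_map_range {α : Type} (n : Nat) (f : Nat → α) (d : α) (i : Nat) (hi : i < n) :
    ((List.range n).map f).getD i d = f i := by
  rw [List.getD_eq_getElem _ _ (by simpa using hi)]; simp

-- a lookup in the precomputed table is the corresponding S-box byte expression
theorem tabLookup (i b : Nat) (hi : i < 4) (hb : b < 256) :
    (pvByteTables.getD i []).getD b 0 =
      PySem.Int.bor (((pvSBOX.getD (2 * i + 1) []).getD (b >>> 4) 0) <<< (4 : Nat))
        ((pvSBOX.getD (2 * i) []).getD (b &&& 15) 0) := by
  unfold pvByteTables
  rw [getD_map_range 4 _ _ i hi, getD_map_range 256 _ _ b hb]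


-- common arithmetic normal form both ports are reduced to (proof-only helpers)
def pvRowLookup (row : List Int) (j : Int) : Int := row.getD j.toNat 0

def pvE (v : Int) : Int :=
    pvRowLookup [14, 4, 13, 1, 2, 15, 11, 8, 3, 10, 6, 12, 5, 9, 0, 7] (v % 16)
  + pvRowLookup [0, 15, 7, 4, 14, 2, 13, 1, 10, 6, 12, 11, 9, 5, 3, 8] (v / 16 % 16) * 16
  + pvRowLookup [4, 1, 14, 8, 13, 6, 2, 11, 15, 12, 9, 7, 3, 10, 0, 5] (v / 256 % 16) * 256
  + pvRowLookup [15, 12, 8, 2, 4, 9, 1, 7, 5, 11, 3, 14, 10, 0, 6, 13] (v / 4096 % 16) * 4096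
  + pvRowLookup [15, 1, 8, 14, 6, 11, 3, 4, 9, 7, 2, 13, 12, 0, 5, 10] (v / 65536 % 16) * 65536
  + pvRowLookup [3, 13, 4, 7, 15, 2, 8, 14, 12, 0, 1, 10, 6, 9, 11, 5] (v / 1048576 % 16) * 1048576
  + pvRowLookup [0, 14, 7, 11, 10, 4, 13, 1, 5, 8, 12, 6, 15, 3, 12, 2] (v / 16777216 % 16) * 16777216
  + pvRowLookup [13, 8, 15, 1, 2, 5, 4, 14, 7, 0, 10, 12, 6, 9, 3, 11] (v / 268435456 % 16) * 268435456

theorem A_eval (value : Int) : t_transform value = pvE value := by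
  unfold t_transform apply_sbox pvE pvRowLookup
  simp only [show PySem.List.pyRange 0 4 1 = [0,1,2,3] from by decide, List.foldl]
  have hsh : ∀ (k : Nat) (x : Int), x >>> ((k : Nat) : Int) = x / 2^k := by
    intro k x
    rw [Int.shiftRight_natCast_right, Int.shiftRight_eq_div_pow]
    norm_num
  have hsh0 : ∀ x : Int, x >>> (0:Int) = x := by
    intro x; rw [show (0:Int) = ((0:Nat):Int) from rfl, hsh]; norm_num
  have hsh8 : ∀ x : Int, x >>> (8:Int) = x / 256 := by
    intro x; rw [show (8:Int) = ((8:Nat):Int) from rfl, hsh]; norm_num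
  have hsh16 : ∀ x : Int, x >>> (16:Int) = x / 65536 := by
    intro x; rw [show (16:Int) = ((16:Nat):Int) from rfl, hsh]; norm_num
  have hsh24 : ∀ x : Int, x >>> (24:Int) = x / 16777216 := by
    intro x; rw [show (24:Int) = ((24:Nat):Int) from rfl, hsh]; norm_num
  have hsh4 : ∀ x : Int, x >>> (4:Int) = x / 16 := by
    intro x; rw [show (4:Int) = ((4:Nat):Int) from rfl, hsh]; norm_num
  have hsl4 : ∀ x : Int, x <<< (4:Int) = x * 16 := by
    intro x; rw [show (4:Int) = ((4:Nat):Int) from rfl, Int.shiftLeft_eq_mul_pow]; norm_num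
  have hsl8 : ∀ x : Int, x <<< (8:Int) = x * 256 := by
    intro x; rw [show (8:Int) = ((8:Nat):Int) from rfl, Int.shiftLeft_eq_mul_pow]; norm_num
  have hsl16 : ∀ x : Int, x <<< (16:Int) = x * 65536 := by
    intro x; rw [show (16:Int) = ((16:Nat):Int) from rfl, Int.shiftLeft_eq_mul_pow]; norm_num
  have hsl24 : ∀ x : Int, x <<< (24:Int) = x * 16777216 := by
    intro x; rw [show (24:Int) = ((24:Nat):Int) from rfl, Int.shiftLeft_eq_mul_pow]; norm_num
  have hslN : ∀ (k : Nat) (x : Int), x <<< k = x * 2^k := by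
    intro k x; rw [← Int.shiftLeft_natCast_right, Int.shiftLeft_eq_mul_pow]; norm_num
  have hsl4n : ∀ x : Int, x <<< (4:Nat) = x * 16 := by intro x; rw [hslN]; norm_num
  have hsl8n : ∀ x : Int, x <<< (8:Nat) = x * 256 := by intro x; rw [hslN]; norm_num
  have hsl16n : ∀ x : Int, x <<< (16:Nat) = x * 65536 := by intro x; rw [hslN]; norm_num
  have hsl24n : ∀ x : Int, x <<< (24:Nat) = x * 16777216 := by intro x; rw [hslN]; norm_num
  have hshn : ∀ (k : Nat) (x : Int), x >>> (k : Nat) = x / (2^k : Int) := by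
    intro k x; rw [Int.shiftRight_eq_div_pow]; norm_cast
  have hsh0n : ∀ x : Int, x >>> (0:Nat) = x := by intro x; rw [hshn]; norm_num
  have hsh8n : ∀ x : Int, x >>> (8:Nat) = x / 256 := by intro x; rw [hshn]; norm_num
  have hsh16n : ∀ x : Int, x >>> (16:Nat) = x / 65536 := by intro x; rw [hshn]; norm_num
  have hsh24n : ∀ x : Int, x >>> (24:Nat) = x / 16777216 := by intro x; rw [hshn]; norm_num
  have hsh4n : ∀ x : Int, x >>> (4:Nat) = x / 16 := by intro x; rw [hshn]; norm_num
  norm_num [band15, band255, hsh0, hsh4, hsh8, hsh16, hsh24, hsl4, hsl8, hsl16, hsl24,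
            hsl4n, hsl8n, hsl16n, hsl24n, hsh0n, hsh4n, hsh8n, hsh16n, hsh24n,
            Int.shiftLeft_eq_mul_pow, Int.shiftRight_eq_div_pow,
            Int.shiftLeft_natCast_right, Int.shiftRight_natCast_right,
            PySem.Int.mod_eq_emod_of_pos, PySem.Int.floordiv_eq_ediv_of_pos,
            pvSBOX, List.getElem_cons_zero, List.getElem_cons_succ,
            show Int.toNat 0 = 0 from rfl, show Int.toNat 2 = 2 from rfl,
            show Int.toNat 3 = 3 from rfl, show Int.toNat 4 = 4 from rfl,
            show Int.toNat 5 = 5 from rfl, show Int.toNat 6 = 6 from rfl,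
            show Int.toNat 7 = 7 from rfl, show Int.toNat 8 = 8 from rfl,
            show Int.toNat 16 = 16 from rfl, show Int.toNat 24 = 24 from rfl]
  -- align A's nibble indices with pvE's
  rw [show value % 256 / 16 % 16 = value / 16 % 16 from by omega,
      show value / 256 % 256 / 16 % 16 = value / 4096 % 16 from by omega,
      show value / 65536 % 256 / 16 % 16 = value / 1048576 % 16 from by omega,
      show value / 16777216 % 256 / 16 % 16 = value / 268435456 % 16 from by omega]
  -- A's pyGet? lookups become List.getD with the same index as pvE's
  have hpg : ∀ (l : List Int) (x : Int),
      (PySem.List.pyGet? l (x % 16)).getD 0 = l.getD (x % 16).toNat 0 := by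
    intro l x
    rw [PySem.List.pyGet?_of_nonneg l (show (0:Int) ≤ x % 16 from Int.emod_nonneg x (by norm_num))]
    simp [List.getD]
  have hge : ∀ (l : List Int) (n : Nat), l[n]?.getD 0 = l.getD n 0 := by
    intro l n; simp [List.getD]
  simp only [hpg, hge]
  -- bounds of the 8 S-box outputs
  obtain ⟨a0, b0⟩ := rowBound [14, 4, 13, 1, 2, 15, 11, 8, 3, 10, 6, 12, 5, 9, 0, 7]
    (by norm_num [pvSBOX]) (value % 16).toNat
  obtain ⟨a1, b1⟩ := rowBound [0, 15, 7, 4, 14, 2, 13, 1, 10, 6, 12, 11, 9, 5, 3, 8]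
    (by norm_num [pvSBOX]) (value / 16 % 16).toNat
  obtain ⟨a2, b2⟩ := rowBound [4, 1, 14, 8, 13, 6, 2, 11, 15, 12, 9, 7, 3, 10, 0, 5]
    (by norm_num [pvSBOX]) (value / 256 % 16).toNat
  obtain ⟨a3, b3⟩ := rowBound [15, 12, 8, 2, 4, 9, 1, 7, 5, 11, 3, 14, 10, 0, 6, 13]
    (by norm_num [pvSBOX]) (value / 4096 % 16).toNat
  obtain ⟨a4, b4⟩ := rowBound [15, 1, 8, 14, 6, 11, 3, 4, 9, 7, 2, 13, 12, 0, 5, 10]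
    (by norm_num [pvSBOX]) (value / 65536 % 16).toNat
  obtain ⟨a5, b5⟩ := rowBound [3, 13, 4, 7, 15, 2, 8, 14, 12, 0, 1, 10, 6, 9, 11, 5]
    (by norm_num [pvSBOX]) (value / 1048576 % 16).toNat
  obtain ⟨a6, b6⟩ := rowBound [0, 14, 7, 11, 10, 4, 13, 1, 5, 8, 12, 6, 15, 3, 12, 2]
    (by norm_num [pvSBOX]) (value / 16777216 % 16).toNat
  obtain ⟨a7, b7⟩ := rowBound [13, 8, 15, 1, 2, 5, 4, 14, 7, 0, 10, 12, 6, 9, 3, 11]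
    (by norm_num [pvSBOX]) (value / 268435456 % 16).toNat
  -- turn every disjoint bitwise-or into an addition, then finish linearly
  rw [intOrAdd 16 4 (by norm_num), intOrAdd 16 4 (by norm_num),
      intOrAdd 16 4 (by norm_num), intOrAdd 16 4 (by norm_num),
      PySem.Int.bor_comm 0, PySem.Int.bor_zero,
      intOrAdd' 256 8 (by norm_num), intOrAdd' 65536 16 (by norm_num),
      intOrAdd' 16777216 24 (by norm_num)]
  all_goals omega

theorem B_eval (value : Int) : t_transform_alt value = pvE value := by
  unfold t_transform_alt
  simp only [List.foldl]
  have hsh : ∀ (k : Nat) (x : Int), x >>> ((k : Nat) : Int) = x / 2^k := by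
    intro k x
    rw [Int.shiftRight_natCast_right, Int.shiftRight_eq_div_pow]
    norm_num
  have hshn : ∀ (k : Nat) (x : Int), x >>> (k : Nat) = x / (2^k : Int) := by
    intro k x; rw [Int.shiftRight_eq_div_pow]; norm_cast
  have hslN : ∀ (k : Nat) (x : Int), x <<< (k : Nat) = x * 2^k := by
    intro k x; rw [← Int.shiftLeft_natCast_right, Int.shiftLeft_eq_mul_pow]; norm_num
  norm_num [band255, hshn, hslN]
  simp only [← List.getD_eq_getElem?_getD]
  rw [tabLookup 3 _ (by norm_num) (by omega),
      tabLookup 2 _ (by norm_num) (by omega),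
      tabLookup 1 _ (by norm_num) (by omega),
      tabLookup 0 _ (by norm_num) (by omega)]
  -- nat-level nibble extraction → the integer nibbles of pvE
  have hhi : ∀ x : Int, ((x % 256).toNat) >>> 4 = (x / 16 % 16).toNat := by
    intro x; rw [Nat.shiftRight_eq_div_pow]; omega
  have hlo : ∀ x : Int, ((x % 256).toNat) &&& 15 = (x % 16).toNat := by
    intro x
    have h := Nat.and_two_pow_sub_one_eq_mod ((x % 256).toNat) 4
    simp only [show (2:Nat)^4 = 16 from rfl] at h
    rw [h]; omega
  simp only [hhi, hlo]
  rw [show value / 16777216 / 16 % 16 = value / 268435456 % 16 from by omega,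
      show value / 65536 / 16 % 16 = value / 1048576 % 16 from by omega,
      show value / 256 / 16 % 16 = value / 4096 % 16 from by omega]
  norm_num [pvSBOX, hslN]
  unfold pvE pvRowLookup
  simp only [List.getD_eq_getElem?_getD]
  -- bounds of the 8 S-box outputs
  obtain ⟨a0, b0⟩ := rowBound [14, 4, 13, 1, 2, 15, 11, 8, 3, 10, 6, 12, 5, 9, 0, 7]
    (by norm_num [pvSBOX]) (value % 16).toNat
  obtain ⟨a1, b1⟩ := rowBound [0, 15, 7, 4, 14, 2, 13, 1, 10, 6, 12, 11, 9, 5, 3, 8]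
    (by norm_num [pvSBOX]) (value / 16 % 16).toNat
  obtain ⟨a2, b2⟩ := rowBound [4, 1, 14, 8, 13, 6, 2, 11, 15, 12, 9, 7, 3, 10, 0, 5]
    (by norm_num [pvSBOX]) (value / 256 % 16).toNat
  obtain ⟨a3, b3⟩ := rowBound [15, 12, 8, 2, 4, 9, 1, 7, 5, 11, 3, 14, 10, 0, 6, 13]
    (by norm_num [pvSBOX]) (value / 4096 % 16).toNat
  obtain ⟨a4, b4⟩ := rowBound [15, 1, 8, 14, 6, 11, 3, 4, 9, 7, 2, 13, 12, 0, 5, 10]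
    (by norm_num [pvSBOX]) (value / 65536 % 16).toNat
  obtain ⟨a5, b5⟩ := rowBound [3, 13, 4, 7, 15, 2, 8, 14, 12, 0, 1, 10, 6, 9, 11, 5]
    (by norm_num [pvSBOX]) (value / 1048576 % 16).toNat
  obtain ⟨a6, b6⟩ := rowBound [0, 14, 7, 11, 10, 4, 13, 1, 5, 8, 12, 6, 15, 3, 12, 2]
    (by norm_num [pvSBOX]) (value / 16777216 % 16).toNat
  obtain ⟨a7, b7⟩ := rowBound [13, 8, 15, 1, 2, 5, 4, 14, 7, 0, 10, 12, 6, 9, 3, 11]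
    (by norm_num [pvSBOX]) (value / 268435456 % 16).toNat
  simp only [List.getD_eq_getElem?_getD] at a0 b0 a1 b1 a2 b2 a3 b3 a4 b4 a5 b5 a6 b6 a7 b7
  set s0 : Int := ([14, 4, 13, 1, 2, 15, 11, 8, 3, 10, 6, 12, 5, 9, 0, 7] : List Int)[(value % 16).toNat]?.getD 0 with hs0
  set s1 : Int := ([0, 15, 7, 4, 14, 2, 13, 1, 10, 6, 12, 11, 9, 5, 3, 8] : List Int)[(value / 16 % 16).toNat]?.getD 0 with hs1
  set s2 : Int := ([4, 1, 14, 8, 13, 6, 2, 11, 15, 12, 9, 7, 3, 10, 0, 5] : List Int)[(value / 256 % 16).toNat]?.getD 0 with hs2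
  set s3 : Int := ([15, 12, 8, 2, 4, 9, 1, 7, 5, 11, 3, 14, 10, 0, 6, 13] : List Int)[(value / 4096 % 16).toNat]?.getD 0 with hs3
  set s4 : Int := ([15, 1, 8, 14, 6, 11, 3, 4, 9, 7, 2, 13, 12, 0, 5, 10] : List Int)[(value / 65536 % 16).toNat]?.getD 0 with hs4
  set s5 : Int := ([3, 13, 4, 7, 15, 2, 8, 14, 12, 0, 1, 10, 6, 9, 11, 5] : List Int)[(value / 1048576 % 16).toNat]?.getD 0 with hs5
  set s6 : Int := ([0, 14, 7, 11, 10, 4, 13, 1, 5, 8, 12, 6, 15, 3, 12, 2] : List Int)[(value / 16777216 % 16).toNat]?.getD 0 with hs6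
  set s7 : Int := ([13, 8, 15, 1, 2, 5, 4, 14, 7, 0, 10, 12, 6, 9, 3, 11] : List Int)[(value / 268435456 % 16).toNat]?.getD 0 with hs7
  -- each table entry is high*16 + low, then the Horner steps are disjoint ors
  rw [intOrAdd 16 4 (by norm_num), intOrAdd 16 4 (by norm_num),
      intOrAdd 16 4 (by norm_num), intOrAdd 16 4 (by norm_num),
      PySem.Int.bor_comm 0, PySem.Int.bor_zero,
      intOrAdd 256 8 (by norm_num) (s7 * 16 + s6) (s5 * 16 + s4),
      intOrAdd 256 8 (by norm_num) ((s7 * 16 + s6) * 256 + (s5 * 16 + s4)) (s3 * 16 + s2),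
      intOrAdd 256 8 (by norm_num)
        (((s7 * 16 + s6) * 256 + (s5 * 16 + s4)) * 256 + (s3 * 16 + s2)) (s1 * 16 + s0)]
  all_goals omega

-- ===== VERDICT (by name: the statement is the Claim_ definition above) =====
theorem t_transform_spec : Claim_equal_t_transform := by
  intro value _
  unfold Spec_t_transform
  rw [A_eval, B_eval]
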